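-- pv_equiv track=rewrite | github.com/MBlistein/advent_of_code | 24/a.py | lay_tiles
-- ===== SOURCE A (Python) =====
-- from typing import Dict, List, Tuple
--
-- def lay_tiles(directions: List[List[str]]) -> Dict[(Tuple[int], int)]:
--     seen = {}
--     for dirs in directions:
--         x, y = 0, 0
--         for d in dirs:
--             if d == 'ne':
--                 x += 1
--                 y += 2
--             elif d == 'e':
--                 x += 2
--             elif d == 'se':
--                 x += 1
--                 y -= 2
--             elif d == 'sw':
--                 x -= 1
--                 y -= 2
--             elif d == 'w':
--                 x -= 2
--             elif d == 'nw':
--                 x -= 1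
--                 y += 2
--             else:
--                 raise ValueError('b')
--
--         if (x, y) in seen:
--             seen[(x, y)] ^= 1
--         else:
--             seen[(x, y)] = 1  # black
--     return seen
-- ===== SOURCE B (Python) =====
-- def lay_tiles(directions):
--     endpoints = []
--     black = set()
--     for dirs in directions:
--         if any(d not in ('ne', 'e', 'se', 'sw', 'w', 'nw') for d in dirs):
--             raise ValueError('b')
--         p = (dirs.count('ne') + dirs.count('se') - dirs.count('sw') - dirs.count('nw')
--              + 2 * (dirs.count('e') - dirs.count('w')),
--              2 * (dirs.count('ne') + dirs.count('nw') - dirs.count('se') - dirs.count('sw')))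
--         endpoints.append(p)
--         black ^= {p}
--     return {p: int(p in black) for p in dict.fromkeys(endpoints)}
-- ===== Notes on version B (the rewrite author's own statement) =====
-- stated objective: alternative
-- what changed: B replaces A's step-by-step coordinate walk and dict XOR-toggling with a per-path closed form (endpoint computed from occurrence counts of the six directions, valid since the steps commute) and a set kept under symmetric difference; the result is assembled afterwards as {p: int(p in black)} over the first-appearance-deduplicated endpoints.
import Mathlib
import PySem

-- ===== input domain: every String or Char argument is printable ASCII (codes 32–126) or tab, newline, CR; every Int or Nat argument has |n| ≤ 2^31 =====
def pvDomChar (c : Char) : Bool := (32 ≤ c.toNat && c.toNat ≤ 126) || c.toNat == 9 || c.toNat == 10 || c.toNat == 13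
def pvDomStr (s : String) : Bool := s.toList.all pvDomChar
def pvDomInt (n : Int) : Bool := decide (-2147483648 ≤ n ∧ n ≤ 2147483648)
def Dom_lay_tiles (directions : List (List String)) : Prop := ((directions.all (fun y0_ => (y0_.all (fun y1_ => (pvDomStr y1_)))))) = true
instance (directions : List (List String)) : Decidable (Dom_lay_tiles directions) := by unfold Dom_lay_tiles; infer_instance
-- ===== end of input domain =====

-- B computes each path's endpoint in closed form from direction-occurrence counts (steps commute)
-- and tracks black tiles as a set under symmetric difference, assembling the dict afterwards —
-- an alternative algorithm of the same cost as A's stepwise walk with dict toggling.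


-- ===== PORT A =====
-- A's inner loop: walk one direction list from (x, y); none = the ValueError branch.
def walkA : List String → Int → Int → Option (Int × Int)
  | [], x, y => some (x, y)
  | d :: ds, x, y =>
    if d == "ne" then walkA ds (x + 1) (y + 2)
    else if d == "e" then walkA ds (x + 2) y
    else if d == "se" then walkA ds (x + 1) (y - 2)
    else if d == "sw" then walkA ds (x - 1) (y - 2)
    else if d == "w" then walkA ds (x - 2) y
    else if d == "nw" then walkA ds (x - 1) (y + 2)
    else none

-- A's outer loop: toggle `seen` per finished path; none propagates the ValueError.
def loopA : List (List String) → PySem.Dict (Int × Int) Int → Option (PySem.Dict (Int × Int) Int)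
  | [], seen => some seen
  | dirs :: rest, seen =>
    match walkA dirs 0 0 with
    | none => none
    | some p =>
      loopA rest
        (if seen.contains p then seen.insert p (PySem.Int.bxor (seen.getD p 0) 1)
         else seen.insert p 1)

def lay_tiles (directions : List (List String)) : List (Int × Int × Int) :=
  match loopA directions PySem.Dict.empty with
  | none => []
  | some seen => seen.items.map (fun q => (q.1.1, q.1.2, q.2))

-- ===== PORT B =====
-- Source B's validity test: d in ('ne', 'e', 'se', 'sw', 'w', 'nw')
def validDirB (d : String) : Bool :=
  d == "ne" || d == "e" || d == "se" || d == "sw" || d == "w" || d == "nw"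

-- Source B's closed-form endpoint from the six occurrence counts
def endpointB (dirs : List String) : Int × Int :=
  ((dirs.count "ne" : Int) + (dirs.count "se" : Int) - (dirs.count "sw" : Int)
     - (dirs.count "nw" : Int) + 2 * ((dirs.count "e" : Int) - (dirs.count "w" : Int)),
   2 * ((dirs.count "ne" : Int) + (dirs.count "nw" : Int) - (dirs.count "se" : Int)
     - (dirs.count "sw" : Int)))

-- Source B's loop: (endpoints, black) accumulators; none = the ValueError branch
def loopB : List (List String) → List (Int × Int) → PySem.Set (Int × Int) →
    Option (List (Int × Int) × PySem.Set (Int × Int))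
  | [], eps, black => some (eps, black)
  | dirs :: rest, eps, black =>
    if dirs.any (fun d => !validDirB d) then none
    else
      let p := endpointB dirs
      loopB rest (eps ++ [p]) (PySem.Set.symmDiff black [p])

def lay_tiles_alt (directions : List (List String)) : List (Int × Int × Int) :=
  match loopB directions [] PySem.Set.empty with
  | none => []
  | some (eps, black) =>
    (PySem.List.dedup eps).map (fun p => (p.1, p.2, if black.contains p then (1 : Int) else 0))

-- ===== PRECONDITION & SPEC =====
-- Pre_ excludes exactly the inputs containing an unknown direction string, on which A raises ValueError.
def Pre_lay_tiles (directions : List (List String)) : Prop :=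
  (directions.all (fun ds => ds.all validDirB)) = true
instance (directions : List (List String)) : Decidable (Pre_lay_tiles directions) := by
  unfold Pre_lay_tiles; infer_instance

def pvWitness_lay_tiles : List (List String) := [["ne", "sw"], ["e", "w"], ["w"]]

def Spec_lay_tiles (directions : List (List String)) (out : List (Int × Int × Int)) : Prop := out = lay_tiles_alt directions
instance (directions : List (List String)) (out : List (Int × Int × Int)) : Decidable (Spec_lay_tiles directions out) := by unfold Spec_lay_tiles; infer_instance

-- ===== CLAIM (what is proved, stated in full; the proofs are below) =====
def Claim_equal_lay_tiles : Prop := ∀ (directions : List (List String)), Dom_lay_tiles directions → Pre_lay_tiles directions → Spec_lay_tiles directions (lay_tiles directions)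

-- ===== LEMMAS AND PROOFS =====

-- A's walk, on a valid path, lands on B's closed-form endpoint
theorem walkA_closed (dirs : List String) (h : dirs.all validDirB = true) (x y : Int) :
    walkA dirs x y = some (x + (endpointB dirs).1, y + (endpointB dirs).2) := by
  induction dirs generalizing x y with
  | nil => simp [walkA, endpointB]
  | cons d ds ih =>
    simp only [List.all_cons, Bool.and_eq_true] at h
    obtain ⟨hd, hds⟩ := h
    unfold validDirB at hd
    simp only [Bool.or_eq_true, beq_iff_eq] at hd
    rcases hd with ((((h1 | h1) | h1) | h1) | h1) | h1 <;>
      subst h1 <;>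
      simp [walkA, endpointB, ih hds, Prod.ext_iff] <;> omega

-- under Pre_, B's loop collects the endpoint list and the symmetric-difference fold
theorem loopB_some (directions : List (List String)) (eps : List (Int × Int))
    (black : PySem.Set (Int × Int))
    (h : (directions.all (fun ds => ds.all validDirB)) = true) :
    loopB directions eps black =
      some (eps ++ directions.map endpointB,
        (directions.map endpointB).foldl (fun s p => PySem.Set.symmDiff s [p]) black) := by
  induction directions generalizing eps black with
  | nil => simp [loopB]
  | cons dirs rest ih =>
    simp only [List.all_cons, Bool.and_eq_true] at h
    obtain ⟨hd, hr⟩ := h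
    have hany : dirs.any (fun d => !validDirB d) = false := by
      simp only [List.all_eq_true] at hd
      simp [List.any_eq_false]; intro d hdm; exact hd d hdm
    simp [loopB, hany, ih _ _ hr]

-- under Pre_, A's outer loop is the toggling fold over B's endpoint list
theorem loopA_eq_fold (directions : List (List String)) (seen : PySem.Dict (Int × Int) Int)
    (h : (directions.all (fun ds => ds.all validDirB)) = true) :
    loopA directions seen = some ((directions.map endpointB).foldl (fun seen p =>
        if seen.contains p then seen.insert p (PySem.Int.bxor (seen.getD p 0) 1)
        else seen.insert p 1) seen) := by
  induction directions generalizing seen with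
  | nil => rfl
  | cons dirs rest ih =>
    simp only [List.all_cons, Bool.and_eq_true] at h
    obtain ⟨hd, hr⟩ := h
    simp [loopA, walkA_closed dirs hd 0 0, ih _ hr]

-- the parity projection relating A's dict values to endpoint counts
def pvParity (q : (Int × Int) × Int) : (Int × Int) × Int := (q.1, PySem.Int.mod q.2 2)

-- toggling a 0/1 parity equals incrementing the count mod 2
theorem pvXorMod (c : Int) : PySem.Int.bxor (c % 2) 1 = (c + 1) % 2 := by
  rcases Int.emod_two_eq c with h | h <;> rw [h]
  · rw [show PySem.Int.bxor 0 1 = 1 from by decide]; omega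
  · rw [show PySem.Int.bxor 1 1 = 0 from by decide]; omega

-- one toggle step of A preserves the parity relation against one counting step
theorem toggle_step (p : Int × Int) (d1 d2 : PySem.Dict (Int × Int) Int)
    (hnd : d2.keys.Nodup) (hrel : d1.items = d2.items.map pvParity) :
    (if d1.contains p then d1.insert p (PySem.Int.bxor (d1.getD p 0) 1)
     else d1.insert p 1).items
      = (d2.insert p (d2.getD p 0 + 1)).items.map pvParity := by
  have hkeys : d1.keys = d2.keys := by
    simp [PySem.Dict.keys, hrel, pvParity, Function.comp]
  have hnd1 : d1.keys.Nodup := hkeys ▸ hnd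
  have hcont : d1.contains p = d2.contains p := by
    rw [PySem.Dict.contains_eq_decide_mem_keys, PySem.Dict.contains_eq_decide_mem_keys, hkeys]
  rcases hc : d2.contains p with _ | _
  · rw [hcont, hc]
    simp only [Bool.false_eq_true, if_false]
    rw [PySem.Dict.items_insert_of_not_contains _ _ hc,
        PySem.Dict.items_insert_of_not_contains _ _ (by rw [hcont]; exact hc),
        PySem.Dict.getD_of_not_contains _ _ hc]
    simp [hrel, pvParity]
  · rw [hcont, hc]
    simp only [if_true]
    rw [PySem.Dict.items_insert_of_contains _ _ hc,
        PySem.Dict.items_insert_of_contains _ _ (by rw [hcont]; exact hc),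
        hrel, List.map_map, List.map_map]
    apply List.map_congr_left
    intro q hq
    by_cases hqp : q.1 = p
    · have hg2 : d2.getD p 0 = q.2 := by
        have : (p, q.2) ∈ d2.items := by rwa [← hqp]
        exact PySem.Dict.getD_of_mem_items _ this hnd 0
      have hg1 : d1.getD p 0 = PySem.Int.mod q.2 2 := by
        have hm : (p, PySem.Int.mod q.2 2) ∈ d1.items := by
          rw [hrel]
          have : pvParity q ∈ d2.items.map pvParity := List.mem_map_of_mem hq
          simpa [pvParity, hqp] using this
        exact PySem.Dict.getD_of_mem_items _ hm hnd1 0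
      simp [Function.comp, pvParity, hqp, hg1, hg2, pvXorMod]
    · simp [Function.comp, pvParity, hqp]

-- A's toggling fold is the counting fold with values taken mod 2
theorem toggle_eq_count (ps : List (Int × Int)) (d1 d2 : PySem.Dict (Int × Int) Int)
    (hnd : d2.keys.Nodup) (hrel : d1.items = d2.items.map pvParity) :
    (ps.foldl (fun seen p =>
        if seen.contains p then seen.insert p (PySem.Int.bxor (seen.getD p 0) 1)
        else seen.insert p 1) d1).items
      = (ps.foldl (fun d p => d.insert p (d.getD p 0 + 1)) d2).items.map pvParity := by
  induction ps generalizing d1 d2 with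
  | nil => simpa using hrel
  | cons p ps ih =>
    simp only [List.foldl_cons]
    exact ih _ _ (PySem.Dict.nodup_keys_insert _ _ _ hnd) (toggle_step p d1 d2 hnd hrel)

-- membership in B's symmetric-difference fold is parity of the element's count
theorem mem_symmFold (eps : List (Int × Int)) (black : PySem.Set (Int × Int)) (p : Int × Int) :
    p ∈ eps.foldl (fun s q => PySem.Set.symmDiff s [q]) black ↔
      (p ∈ black ↔ eps.count p % 2 = 0) := by
  induction eps generalizing black with
  | nil => simp
  | cons q eps ih =>
    simp only [List.foldl_cons, ih]
    by_cases hpq : p = q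
    · subst hpq
      by_cases hb : p ∈ black <;> by_cases hcnt : eps.count p % 2 = 0 <;>
        simp [PySem.Set.mem_symmDiff, List.count_cons_self, hb, hcnt] <;> omega
    · simp [PySem.Set.mem_symmDiff, hpq, Ne.symm hpq]

-- a Nat count cast to Int, taken Python-mod 2, as a 0/1 value
theorem pvModVal (c : Nat) : PySem.Int.mod (c : Int) 2 = if c % 2 = 0 then 0 else 1 := by
  rw [PySem.Int.mod_eq_emod_of_pos (by norm_num)]
  split <;> omega

-- ===== VERDICT (by name: the statement is the Claim_ definition above) =====
theorem lay_tiles_spec : Claim_equal_lay_tiles := by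
  intro directions _ hpre
  unfold Spec_lay_tiles
  unfold lay_tiles lay_tiles_alt
  rw [loopA_eq_fold directions PySem.Dict.empty hpre, loopB_some directions [] PySem.Set.empty hpre]
  dsimp only
  rw [toggle_eq_count (directions.map endpointB) PySem.Dict.empty PySem.Dict.empty
        PySem.Dict.nodup_keys_empty (by rfl),
      PySem.Dict.foldl_insert_getD_add_one_eq_counter,
      PySem.Dict.items_counter, PySem.List.dedup_eq_ofList, List.map_map, List.map_map]
  apply List.map_congr_left
  intro p hp
  set S := (directions.map endpointB).foldl
      (fun s q => PySem.Set.symmDiff s [q]) PySem.Set.empty with hS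
  have hiff : p ∈ S ↔ ¬ ((directions.map endpointB).count p % 2 = 0) := by
    rw [hS, mem_symmFold]
    simp [PySem.Set.empty]
  dsimp only [Function.comp, pvParity]
  simp only [Prod.mk.injEq, true_and]
  rw [pvModVal]
  by_cases hm : p ∈ S
  · rw [if_pos ((PySem.Set.contains_iff S p).mpr hm)]
    simp [hiff.mp hm]
  · have hfalse : ¬ (S.contains p = true) := fun h => hm ((PySem.Set.contains_iff S p).mp h)
    rw [if_neg hfalse]
    have h0 : (directions.map endpointB).count p % 2 = 0 := by
      by_contra h0
      exact hm (hiff.mpr h0)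
    simp [h0]
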